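-- pv_equiv track=rewrite | github.com/alantanlc/time-domain-features-extraction | TanLaiChianAlan_A0174404L_A2.py | compute_sro
-- ===== SOURCE A (Python) =====
-- def compute_sro(data_abs, L):
--     # Compute L energy
--     rhs = L * sum(data_abs)
--
--     # Find smallest bin index R such that L energy is less than the sum of it
--     r = -1
--     for i in range(len(data_abs)):
--         x = data_abs[0:i+1]
--         if sum(x) >= rhs:
--             r = i
--             break
--
--     return r
-- ===== SOURCE B (Python) =====
-- def compute_sro(data_abs, L):
--     # One pass for the total, then a single scan with a running sum and early return.
--     rhs = L * sum(data_abs)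
--     running = 0
--     for i, v in enumerate(data_abs):
--         running += v
--         if running >= rhs:
--             return i
--     return -1
-- ===== Notes on version B (the rewrite author's own statement) =====
-- stated objective: simpler
-- what changed: B replaces A's quadratic per-index slice-and-resum with a single running-sum scan that returns the first index whose prefix sum reaches L*total; same values on all inputs.
import Mathlib
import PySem

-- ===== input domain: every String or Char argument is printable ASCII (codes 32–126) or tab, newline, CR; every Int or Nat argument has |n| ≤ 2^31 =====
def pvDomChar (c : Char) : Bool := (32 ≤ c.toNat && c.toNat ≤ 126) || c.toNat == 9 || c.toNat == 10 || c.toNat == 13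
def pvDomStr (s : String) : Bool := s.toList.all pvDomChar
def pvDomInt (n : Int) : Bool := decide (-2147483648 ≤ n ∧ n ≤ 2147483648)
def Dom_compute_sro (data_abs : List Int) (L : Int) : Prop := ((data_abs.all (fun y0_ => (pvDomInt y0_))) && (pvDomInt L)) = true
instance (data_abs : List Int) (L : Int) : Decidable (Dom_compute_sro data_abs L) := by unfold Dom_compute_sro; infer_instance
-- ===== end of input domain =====

-- B replaces A's per-index slice re-summation with a single running-sum scan with early return (simpler).

-- ===== PORT A =====
-- the 'for i in range(len(data_abs))' loop with break: first index whose slice-sum reaches rhs, else -1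
def computeSroLoopA (data_abs : List Int) (rhs : Int) : List Int → Int
  | [] => -1
  | i :: rest =>
    let x := PySem.List.slice data_abs (some 0) (some (i + 1))
    if x.sum ≥ rhs then i else computeSroLoopA data_abs rhs rest

def compute_sro (data_abs : List Int) (L : Int) : Int :=
  let rhs := L * data_abs.sum
  computeSroLoopA data_abs rhs (PySem.List.pyRange 0 data_abs.length 1)

-- ===== PORT B =====
-- the 'for i, v in enumerate(data_abs)' loop with running sum and early return
def computeSroSearchB (rhs : Int) (running : Int) (i : Int) : List Int → Int
  | [] => -1
  | v :: rest =>
    let r := running + v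
    if r ≥ rhs then i else computeSroSearchB rhs r (i + 1) rest

def compute_sro_alt (data_abs : List Int) (L : Int) : Int :=
  let rhs := L * data_abs.sum
  computeSroSearchB rhs 0 0 data_abs

-- ===== PRECONDITION & SPEC =====
def Spec_compute_sro (data_abs : List Int) (L : Int) (out : Int) : Prop := out = compute_sro_alt data_abs L
instance (data_abs : List Int) (L : Int) (out : Int) : Decidable (Spec_compute_sro data_abs L out) := by unfold Spec_compute_sro; infer_instance

-- ===== CLAIM (what is proved, stated in full; the proofs are below) =====
def Claim_equal_compute_sro : Prop := ∀ (data_abs : List Int) (L : Int), Dom_compute_sro data_abs L → Spec_compute_sro data_abs L (compute_sro data_abs L)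

-- ===== LEMMAS AND PROOFS =====

-- the two scans agree from any start index j
theorem pvLoop_eq (data_abs : List Int) (rhs : Int) :
    ∀ (fuel : Nat) (j : Nat), data_abs.length - j ≤ fuel →
    computeSroLoopA data_abs rhs (PySem.List.pyRange (j : Int) (data_abs.length : Int) 1)
      = computeSroSearchB rhs ((data_abs.take j).sum) (j : Int) (data_abs.drop j) := by
  intro fuel
  induction fuel with
  | zero =>
    intro j h
    have hj : data_abs.length ≤ j := by omega
    have hr : PySem.List.pyRange (j : Int) (data_abs.length : Int) 1 = [] := by
      apply PySem.List.pyRange_one_eq_nil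
      exact_mod_cast hj
    have hd : data_abs.drop j = [] := List.drop_eq_nil_of_le hj
    rw [hr, hd]; rfl
  | succ n ih =>
    intro j h
    by_cases hj : j < data_abs.length
    · have hlt : (j : Int) < (data_abs.length : Int) := by exact_mod_cast hj
      rw [PySem.List.pyRange_one_cons hlt]
      rw [List.drop_eq_getElem_cons hj]
      simp only [computeSroLoopA, computeSroSearchB]
      have hslice : PySem.List.slice data_abs (some 0) (some ((j : Int) + 1))
          = data_abs.take (j + 1) := by
        rw [PySem.List.slice_zero_start, PySem.List.slice_to]
        congr 1
        omega
      rw [hslice]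
      have hsum : (data_abs.take (j + 1)).sum = (data_abs.take j).sum + data_abs[j] := by
        rw [List.sum_take_succ _ _ hj]
      rw [hsum]
      by_cases hc : (data_abs.take j).sum + data_abs[j] ≥ rhs
      · simp [hc]
      · rw [if_neg hc, if_neg hc]
        have := ih (j + 1) (by omega)
        rw [hsum] at this
        push_cast at this ⊢
        exact this
    · have hj' : data_abs.length ≤ j := by omega
      have hr : PySem.List.pyRange (j : Int) (data_abs.length : Int) 1 = [] := by
        apply PySem.List.pyRange_one_eq_nil
        exact_mod_cast hj'
      have hd : data_abs.drop j = [] := List.drop_eq_nil_of_le hj'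
      rw [hr, hd]; rfl

-- ===== VERDICT (by name: the statement is the Claim_ definition above) =====
theorem compute_sro_spec : Claim_equal_compute_sro := by
  intro data_abs L _
  unfold Spec_compute_sro compute_sro compute_sro_alt
  have := pvLoop_eq data_abs (L * data_abs.sum) data_abs.length 0 (by omega)
  simpa using this
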